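-- pv_equiv track=rewrite | github.com/Georgeingebretsen/ai-city | backend/app/game.py | distribute_tiles
-- ===== SOURCE A (Python) =====
-- def distribute_tiles(grid_size: int, agent_ids: list[int]) -> list[tuple[int, int, int]]:
--     """Give each agent a contiguous rectangular region of the grid.
--
--     Recursively splits the grid along the longer axis, proportional
--     to the number of agents on each side.  For 4 agents this produces
--     exact quadrants (corners); other counts get a treemap-style layout.
--
--     Returns list of (x, y, owner_id).
--     """
--     assignments: list[tuple[int, int, int]] = []
--
--     def _assign(agents: list[int], x0: int, y0: int, x1: int, y1: int):
--         if len(agents) == 1: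
--             for x in range(x0, x1):
--                 for y in range(y0, y1):
--                     assignments.append((x, y, agents[0]))
--             return
--
--         mid = len(agents) // 2
--         left, right = agents[:mid], agents[mid:]
--
--         if (x1 - x0) >= (y1 - y0):
--             # Split vertically
--             split = x0 + round((x1 - x0) * len(left) / len(agents))
--             _assign(left, x0, y0, split, y1)
--             _assign(right, split, y0, x1, y1)
--         else:
--             # Split horizontally
--             split = y0 + round((y1 - y0) * len(left) / len(agents))
--             _assign(left, x0, y0, x1, split)
--             _assign(right, x0, split, x1, y1)
--
--     _assign(list(agent_ids), 0, 0, grid_size, grid_size)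
--     return assignments
-- ===== SOURCE B (Python) =====
-- def distribute_tiles(grid_size: int, agent_ids: list[int]) -> list[tuple[int, int, int]]:
--     """Level-synchronous treemap: repeatedly refine a flat list of
--     (agents, rect) frames in place (each multi-agent frame is replaced by its
--     two sub-frames, left first) until every frame holds one agent, then expand
--     every rectangle to cells in a single final pass.  Same split formula as A;
--     the in-place replacement preserves A's pre-order leaf order.
--     """
--     frames = [(list(agent_ids), 0, 0, grid_size, grid_size)]
--     while any(len(fr[0]) > 1 for fr in frames):
--         nxt = []
--         for agents, x0, y0, x1, y1 in frames:
--             if len(agents) == 1: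
--                 nxt.append((agents, x0, y0, x1, y1))
--                 continue
--             mid = len(agents) // 2
--             left, right = agents[:mid], agents[mid:]
--             if (x1 - x0) >= (y1 - y0):
--                 split = x0 + round((x1 - x0) * len(left) / len(agents))
--                 nxt.append((left, x0, y0, split, y1))
--                 nxt.append((right, split, y0, x1, y1))
--             else:
--                 split = y0 + round((y1 - y0) * len(left) / len(agents))
--                 nxt.append((left, x0, y0, x1, split))
--                 nxt.append((right, x0, split, x1, y1))
--         frames = nxt
--     return [(x, y, agents[0])
--             for agents, x0, y0, x1, y1 in frames
--             for x in range(x0, x1) for y in range(y0, y1)]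
-- ===== Notes on version B (the rewrite author's own statement) =====
-- stated objective: alternative
-- what changed: The recursive _assign closure mutating a shared list is replaced by a level-synchronous refinement: a flat list of (agents,rect) frames is repeatedly rewritten in place (each multi-agent frame becomes its two sub-frames, left first) until all frames are singletons, then one final pass expands rectangles to cells; the split formula is unchanged.
import Mathlib
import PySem

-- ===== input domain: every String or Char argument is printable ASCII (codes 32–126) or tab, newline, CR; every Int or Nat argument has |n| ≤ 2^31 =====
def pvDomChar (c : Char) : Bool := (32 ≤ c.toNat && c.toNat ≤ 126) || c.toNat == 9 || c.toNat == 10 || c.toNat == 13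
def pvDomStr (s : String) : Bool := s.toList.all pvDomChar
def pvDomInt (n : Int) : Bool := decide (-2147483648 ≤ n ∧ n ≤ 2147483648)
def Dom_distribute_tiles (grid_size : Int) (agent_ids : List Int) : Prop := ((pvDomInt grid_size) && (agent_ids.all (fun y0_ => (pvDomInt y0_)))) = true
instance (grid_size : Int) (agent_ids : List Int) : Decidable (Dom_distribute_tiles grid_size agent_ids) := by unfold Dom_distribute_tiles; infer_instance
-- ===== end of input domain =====

-- B replaces the recursive helper by a level-synchronous refinement of a flat frame list plus one final expansion pass (same split formula, same emission order); alternative decomposition, no speed claim.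

-- ===== PORT A =====
-- Exact model of Python's round(p/q) for ints p, q>0: the correctly rounded
-- IEEE double of p/q (round-to-nearest, ties-to-even, 53-bit significand),
-- then round() = ties-to-even to an integer. Used by BOTH ports (both Pythons
-- contain the identical `round((x1-x0)*len(left)/len(agents))` expression).
-- Exactness: p/q here always satisfies |p/q| ≤ |x1-x0|, so no overflow; in the
-- subnormal range (|p/q| < 2^-1022) the 53-bit model differs from the double
-- only below 0.5, where the final integer rounding gives 0 either way.
def pvRHE (a b : Int) : Int :=
  -- round-half-even of a/b, for b > 0
  let d := PySem.Int.floordiv a b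
  let r := a - d * b
  if 2 * r < b then d
  else if b < 2 * r then d + 1
  else if PySem.Int.mod d 2 = 0 then d else d + 1

def pvMant (p q : Int) (s : Int) : Int :=
  -- round-half-even of p*2^s/q
  if 0 ≤ s then pvRHE (p * 2 ^ s.toNat) q else pvRHE p (q * 2 ^ (-s).toNat)

def pvRoundDivNN (p q : Int) : Int :=
  -- round(float(p)/q) for p ≥ 0, q > 0
  if p = 0 then 0
  else
    let s0 : Int := 52 - ((PySem.Int.bitLength p : Int) - (PySem.Int.bitLength q : Int))
    let m0 := pvMant p q s0
    let ms : Int × Int :=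
      if 2 ^ 53 ≤ m0 then (pvMant p q (s0 - 1), s0 - 1)
      else if m0 < 2 ^ 52 then
        let m1 := pvMant p q (s0 + 1)
        if 2 ^ 53 ≤ m1 then (pvMant p q s0, s0) else (m1, s0 + 1)
      else (m0, s0)
    if ms.2 ≤ 0 then ms.1 * 2 ^ (-ms.2).toNat else pvRHE ms.1 (2 ^ ms.2.toNat)

def pvRoundDiv (p q : Int) : Int :=
  -- round(p/q): odd extension (fl and ties-to-even are both odd functions)
  if p < 0 then -pvRoundDivNN (-p) q else pvRoundDivNN p q

-- leaf emission: for x in range(x0,x1): for y in range(y0,y1): append (x,y,a)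
def pvLeaf (a x0 y0 x1 y1 : Int) : List (Int × Int × Int) :=
  (PySem.List.pyRange x0 x1 1).flatMap
    (fun x => (PySem.List.pyRange y0 y1 1).map (fun y => (x, y, a)))

-- the recursive _assign helper; acc-free, returns its emissions in order.
-- `fuel` is a pure totality guard (structural recursion handle): any
-- fuel ≥ len(agents)-1 reproduces Python's recursion exactly (proved in
-- pvAssignF_fuel below); distribute_tiles passes len(agents).
-- mid = len//2 on Nat lengths is exact (Python's // on nonnegative ints).
def pvAssignF (fuel : Nat) (agents : List Int) (x0 y0 x1 y1 : Int) : List (Int × Int × Int) :=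
  match agents with
  | [] => []  -- Python raises ZeroDivisionError here; excluded by Pre_
  | [a] => pvLeaf a x0 y0 x1 y1
  | a :: b :: l =>
    match fuel with
    | 0 => []  -- out of fuel: unreachable from distribute_tiles (fuel ≥ len-1)
    | f + 1 =>
      let agents := a :: b :: l
      let mid := agents.length / 2
      let left := agents.take mid
      let right := agents.drop mid
      if y1 - y0 ≤ x1 - x0 then
        let split := x0 + pvRoundDiv ((x1 - x0) * (left.length : Int)) (agents.length : Int)
        pvAssignF f left x0 y0 split y1 ++ pvAssignF f right split y0 x1 y1
      else
        let split := y0 + pvRoundDiv ((y1 - y0) * (left.length : Int)) (agents.length : Int)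
        pvAssignF f left x0 y0 x1 split ++ pvAssignF f right x0 split x1 y1

def distribute_tiles (grid_size : Int) (agent_ids : List Int) : List (Int × Int × Int) :=
  pvAssignF agent_ids.length agent_ids 0 0 grid_size grid_size

-- ===== PORT B =====
-- one refinement step of a single frame: a singleton stays, a multi-agent
-- frame is replaced (in place) by its two sub-frames, left first
def pvStep (fr : List Int × Int × Int × Int × Int) : List (List Int × Int × Int × Int × Int) :=
  match fr with
  | (agents0, x0, y0, x1, y1) =>
    match agents0 with
    | [] => [(agents0, x0, y0, x1, y1)]  -- Python later raises IndexError on such a frame; excluded by Pre_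
    | [a] => [([a], x0, y0, x1, y1)]
    | a :: b :: l =>
      let agents := a :: b :: l
      let mid := agents.length / 2
      let left := agents.take mid
      let right := agents.drop mid
      if y1 - y0 ≤ x1 - x0 then
        let split := x0 + pvRoundDiv ((x1 - x0) * (left.length : Int)) (agents.length : Int)
        [(left, x0, y0, split, y1), (right, split, y0, x1, y1)]
      else
        let split := y0 + pvRoundDiv ((y1 - y0) * (left.length : Int)) (agents.length : Int)
        [(left, x0, y0, x1, split), (right, x0, split, x1, y1)]

-- the `while any(len>1)` loop: keep refining the whole frame list at once.
-- `fuel` bounds the number of passes; fuel = len(agent_ids) suffices (each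
-- pass strictly shrinks the largest agent list until all are singletons).
def pvRefine (fuel : Nat) (frames : List (List Int × Int × Int × Int × Int)) :
    List (List Int × Int × Int × Int × Int) :=
  match fuel with
  | 0 => frames
  | f + 1 =>
    if frames.any (fun fr => 1 < fr.1.length) then pvRefine f (frames.flatMap pvStep)
    else frames

-- final pass: expand every (singleton) frame's rectangle to cells
def pvEmit (frames : List (List Int × Int × Int × Int × Int)) : List (Int × Int × Int) :=
  frames.flatMap (fun fr =>
    match fr with
    | (agents, x0, y0, x1, y1) =>
      match agents with
      | [] => []  -- Python raises IndexError (agents[0]) here; excluded by Pre_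
      | a :: _ => pvLeaf a x0 y0 x1 y1)

def distribute_tiles_alt (grid_size : Int) (agent_ids : List Int) : List (Int × Int × Int) :=
  pvEmit (pvRefine agent_ids.length [(agent_ids, 0, 0, grid_size, grid_size)])

-- ===== PRECONDITION & SPEC =====
-- Pre_ excludes only the empty agent list, on which both Pythons raise (A: ZeroDivisionError, B: IndexError).
def Pre_distribute_tiles (grid_size : Int) (agent_ids : List Int) : Prop := agent_ids ≠ []
instance (grid_size : Int) (agent_ids : List Int) : Decidable (Pre_distribute_tiles grid_size agent_ids) := by unfold Pre_distribute_tiles; infer_instance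
def pvWitness_distribute_tiles : Int × List Int := (4, [1, 2, 3, 4])
def Spec_distribute_tiles (grid_size : Int) (agent_ids : List Int) (out : List (Int × Int × Int)) : Prop := out = distribute_tiles_alt grid_size agent_ids
instance (grid_size : Int) (agent_ids : List Int) (out : List (Int × Int × Int)) : Decidable (Spec_distribute_tiles grid_size agent_ids out) := by unfold Spec_distribute_tiles; infer_instance

-- ===== CLAIM (what is proved, stated in full; the proofs are below) =====
def Claim_equal_distribute_tiles : Prop := ∀ (grid_size : Int) (agent_ids : List Int), Dom_distribute_tiles grid_size agent_ids → Pre_distribute_tiles grid_size agent_ids → Spec_distribute_tiles grid_size agent_ids (distribute_tiles grid_size agent_ids)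

-- ===== LEMMAS AND PROOFS =====

-- any sufficient fuel computes the same recursion
theorem pvAssignF_fuel : ∀ (f g : Nat) (agents : List Int) (x0 y0 x1 y1 : Int),
    agents.length ≤ f + 1 → agents.length ≤ g + 1 →
    pvAssignF f agents x0 y0 x1 y1 = pvAssignF g agents x0 y0 x1 y1 := by
  intro f
  induction f with
  | zero =>
    intro g agents x0 y0 x1 y1 hf _
    match agents with
    | [] => simp [pvAssignF]
    | [a] => simp [pvAssignF]
    | a :: b :: l => simp at hf
  | succ f ih =>
    intro g agents x0 y0 x1 y1 hf hg
    match agents with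
    | [] => simp [pvAssignF]
    | [a] => simp [pvAssignF]
    | a :: b :: l =>
      have hlen : (a :: b :: l).length = l.length + 2 := by simp
      match g with
      | 0 => simp at hg
      | g + 1 =>
        rw [pvAssignF, pvAssignF]
        simp only
        have h1 : ((a :: b :: l).take ((a :: b :: l).length / 2)).length ≤ f + 1 := by
          simp [List.length_take]; omega
        have h2 : ((a :: b :: l).take ((a :: b :: l).length / 2)).length ≤ g + 1 := by
          simp [List.length_take]; omega
        have h3 : ((a :: b :: l).drop ((a :: b :: l).length / 2)).length ≤ f + 1 := by
          simp [List.length_drop]; omega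
        have h4 : ((a :: b :: l).drop ((a :: b :: l).length / 2)).length ≤ g + 1 := by
          simp [List.length_drop]; omega
        split
        · rw [ih g _ _ _ _ _ h1 h2, ih g _ _ _ _ _ h3 h4]
        · rw [ih g _ _ _ _ _ h1 h2, ih g _ _ _ _ _ h3 h4]

-- one refinement step of a single frame, emitted, is one unfolding of _assign
theorem pvStep_emit : ∀ (fr : List Int × Int × Int × Int × Int),
    fr.1 ≠ [] →
    (pvStep fr).flatMap (fun c => pvAssignF c.1.length c.1 c.2.1 c.2.2.1 c.2.2.2.1 c.2.2.2.2)
      = pvAssignF fr.1.length fr.1 fr.2.1 fr.2.2.1 fr.2.2.2.1 fr.2.2.2.2 := by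
  rintro ⟨agents0, x0, y0, x1, y1⟩ hne
  match agents0 with
  | [] => exact absurd rfl hne
  | [a] => simp [pvStep, pvAssignF]
  | a :: b :: l =>
    have hlen : (a :: b :: l).length = l.length + 2 := by simp
    have hlt : ((a :: b :: l).take ((a :: b :: l).length / 2)).length = (a :: b :: l).length / 2 := by
      simp [List.length_take]; omega
    have hld : ((a :: b :: l).drop ((a :: b :: l).length / 2)).length
        = (a :: b :: l).length - (a :: b :: l).length / 2 := by simp [List.length_drop]
    rw [pvStep]
    simp only
    conv_rhs => rw [hlen, pvAssignF]
    split
    all_goals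
      simp only [List.flatMap_cons, List.flatMap_nil, List.append_nil]
      rw [pvAssignF_fuel ((a :: b :: l).take ((a :: b :: l).length / 2)).length (l.length + 1)
            ((a :: b :: l).take ((a :: b :: l).length / 2)) _ _ _ _
            (by omega) (by rw [hlt]; omega),
          pvAssignF_fuel ((a :: b :: l).drop ((a :: b :: l).length / 2)).length (l.length + 1)
            ((a :: b :: l).drop ((a :: b :: l).length / 2)) _ _ _ _
            (by omega) (by rw [hld]; omega)]

-- frames produced by pvStep keep agent lists nonempty and shrink the bound
theorem pvStep_sub : ∀ (fr : List Int × Int × Int × Int × Int) (n : Nat),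
    fr.1 ≠ [] → fr.1.length ≤ n + 2 →
    ∀ c ∈ pvStep fr, c.1 ≠ [] ∧ c.1.length ≤ n + 1 := by
  rintro ⟨agents0, x0, y0, x1, y1⟩ n hne hlen c hc
  match agents0 with
  | [] => exact absurd rfl hne
  | [a] =>
    simp [pvStep] at hc
    subst hc; simp
  | a :: b :: l =>
    have h2 : (a :: b :: l).length = l.length + 2 := by simp
    have hlt : ((a :: b :: l).take ((a :: b :: l).length / 2)).length = (a :: b :: l).length / 2 := by
      simp [List.length_take]; omega
    have hld : ((a :: b :: l).drop ((a :: b :: l).length / 2)).length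
        = (a :: b :: l).length - (a :: b :: l).length / 2 := by simp [List.length_drop]
    have htne : (a :: b :: l).take ((a :: b :: l).length / 2) ≠ [] := by
      intro h; rw [h] at hlt; simp at hlt; omega
    have hdne : (a :: b :: l).drop ((a :: b :: l).length / 2) ≠ [] := by
      intro h; rw [h] at hld; simp at hld; omega
    rw [pvStep] at hc
    simp only at hc
    split at hc <;>
    · simp only [List.mem_cons] at hc
      rcases hc with hc | hc | hc
      · subst hc; exact ⟨htne, by rw [hlt]; simp at hlen; omega⟩
      · subst hc; exact ⟨hdne, by rw [hld]; simp at hlen; omega⟩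
      · cases hc

-- a list of nonempty singleton frames is already fully refined: emitting it
-- is emitting _assign on each frame
theorem pvEmit_singletons : ∀ (fs : List (List Int × Int × Int × Int × Int)),
    (∀ fr ∈ fs, fr.1 ≠ [] ∧ fr.1.length ≤ 1) →
    pvEmit fs
      = fs.flatMap (fun fr => pvAssignF fr.1.length fr.1 fr.2.1 fr.2.2.1 fr.2.2.2.1 fr.2.2.2.2) := by
  intro fs h
  induction fs with
  | nil => rfl
  | cons fr rest ih =>
    obtain ⟨⟨agents0, x0, y0, x1, y1⟩, rfl⟩ : ∃ t, fr = t := ⟨fr, rfl⟩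
    have hh := h _ (List.mem_cons_self ..)
    match agents0 with
    | [] => exact absurd rfl hh.1
    | [a] =>
      have hrest := ih (fun fr hfr => h fr (List.mem_cons_of_mem _ hfr))
      simp only [pvEmit, List.flatMap_cons] at hrest ⊢
      rw [hrest]
      simp [pvAssignF]
    | a :: b :: l => simp at hh

-- with enough fuel, the refinement loop followed by the expansion pass
-- computes, per frame and in order, exactly what _assign emits
theorem pvRefine_emit : ∀ (f : Nat) (fs : List (List Int × Int × Int × Int × Int)),
    (∀ fr ∈ fs, fr.1 ≠ [] ∧ fr.1.length ≤ f + 1) →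
    pvEmit (pvRefine f fs)
      = fs.flatMap (fun fr => pvAssignF fr.1.length fr.1 fr.2.1 fr.2.2.1 fr.2.2.2.1 fr.2.2.2.2) := by
  intro f
  induction f with
  | zero =>
    intro fs h
    exact pvEmit_singletons fs h
  | succ f ih =>
    intro fs h
    rw [pvRefine]
    split
    · rw [ih (fs.flatMap pvStep)
        (by
          intro c hc
          rw [List.mem_flatMap] at hc
          obtain ⟨fr, hfr, hc⟩ := hc
          exact pvStep_sub fr f (h fr hfr).1 (by have := (h fr hfr).2; omega) c hc)]
      rw [List.flatMap_assoc]
      refine List.flatMap_congr ?_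
      intro fr hfr
      exact pvStep_emit fr (h fr hfr).1
    · rename_i hany
      refine pvEmit_singletons fs ?_
      intro fr hfr
      refine ⟨(h fr hfr).1, ?_⟩
      by_contra hgt
      exact hany (List.any_eq_true.2 ⟨fr, hfr, by simp; omega⟩)

-- ===== VERDICT (by name: the statement is the Claim_ definition above) =====
theorem distribute_tiles_spec : Claim_equal_distribute_tiles := by
  intro g ids _ hpre
  unfold Spec_distribute_tiles distribute_tiles distribute_tiles_alt
  match h : ids with
  | [] => exact absurd rfl hpre
  | a :: l =>
    rw [pvRefine_emit (a :: l).length [(a :: l, 0, 0, g, g)]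
      (by rintro fr hfr; simp at hfr; subst hfr; constructor <;> simp)]
    simp
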